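-- pv_equiv track=rewrite | github.com/KristinaNikitenko/y-244Nikitenko | 9.9.1.py | find_A_and_max
-- ===== SOURCE A (Python) =====
-- def find_A_and_max(matrix, k):
--     A=[]
--     for row in matrix:
--         for elem in row:
--             if elem % k==0:
--                 A.append(elem)
--     if A:
--         return len(A), max(A)
--     else:
--         return 0, None
-- ===== SOURCE B (Python) =====
-- def find_A_and_max(matrix, k):
--     count = 0
--     best = None
--     for row in matrix:
--         for e in row:
--             if e % k == 0:
--                 count += 1
--                 if best is None or e > best:
--                     best = e
--     return count, best
-- ===== Notes on version B (the rewrite author's own statement) =====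
-- stated objective: simpler
-- what changed: Drops the intermediate list entirely: one online pass maintains a running (count, best) accumulator, updating best on each divisible element, instead of appending matches to a list and then scanning it with len/max.
import Mathlib
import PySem

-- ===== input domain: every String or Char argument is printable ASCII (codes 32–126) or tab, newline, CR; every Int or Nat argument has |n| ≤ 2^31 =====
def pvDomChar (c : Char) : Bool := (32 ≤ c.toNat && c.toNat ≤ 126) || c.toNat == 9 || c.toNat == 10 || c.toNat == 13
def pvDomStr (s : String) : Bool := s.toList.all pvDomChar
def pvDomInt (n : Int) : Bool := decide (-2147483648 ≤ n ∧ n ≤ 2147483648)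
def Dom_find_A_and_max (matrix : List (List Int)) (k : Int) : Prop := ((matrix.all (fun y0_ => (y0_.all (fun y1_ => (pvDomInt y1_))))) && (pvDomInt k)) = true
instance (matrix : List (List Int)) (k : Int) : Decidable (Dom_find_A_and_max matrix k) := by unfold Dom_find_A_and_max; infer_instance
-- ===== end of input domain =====

-- B replaces A's list-building pass plus final len/max scan by a single online pass that
-- maintains a running (count, best) accumulator, no intermediate list (objective: simpler).

-- ===== PORT A =====
def find_A_and_max (matrix : List (List Int)) (k : Int) : Int × Option Int :=
  let A := matrix.foldl
    (fun acc row => row.foldl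
      (fun acc elem => if PySem.Int.mod elem k == 0 then acc ++ [elem] else acc) acc)
    ([] : List Int)
  if A.isEmpty then (0, none) else ((A.length : Int), PySem.List.max? A (fun x => x))

-- ===== PORT B =====
-- one step of B's online accumulation: bump the count, update the running best
def pvStepB (k : Int) (st : Int × Option Int) (e : Int) : Int × Option Int :=
  if PySem.Int.mod e k == 0 then
    (st.1 + 1, match st.2 with
               | none => some e
               | some b => if e > b then some e else some b)
  else st

def find_A_and_max_alt (matrix : List (List Int)) (k : Int) : Int × Option Int :=
  matrix.foldl (fun st row => row.foldl (pvStepB k) st) ((0 : Int), (none : Option Int))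

-- ===== PRECONDITION & SPEC =====
-- Pre_ excludes exactly the inputs where Python A raises ZeroDivisionError:
-- k = 0 while some element exists (so `elem % k` is evaluated).
def Pre_find_A_and_max (matrix : List (List Int)) (k : Int) : Prop :=
  k ≠ 0 ∨ matrix.all (fun r => r.isEmpty) = true
instance (matrix : List (List Int)) (k : Int) : Decidable (Pre_find_A_and_max matrix k) := by
  unfold Pre_find_A_and_max; infer_instance
def pvWitness_find_A_and_max : List (List Int) × Int := ([[2, 3], [4]], 2)

def Spec_find_A_and_max (matrix : List (List Int)) (k : Int) (out : Int × Option Int) : Prop := out = find_A_and_max_alt matrix k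
instance (matrix : List (List Int)) (k : Int) (out : Int × Option Int) : Decidable (Spec_find_A_and_max matrix k out) := by unfold Spec_find_A_and_max; infer_instance

-- ===== CLAIM (what is proved, stated in full; the proofs are below) =====
def Claim_equal_find_A_and_max : Prop := ∀ (matrix : List (List Int)) (k : Int), Dom_find_A_and_max matrix k → Pre_find_A_and_max matrix k → Spec_find_A_and_max matrix k (find_A_and_max matrix k)

-- ===== LEMMAS AND PROOFS =====

-- the best-update used by B on the divisible elements only
def pvBest (b : Option Int) (e : Int) : Option Int :=
  match b with
  | none => some e
  | some x => if e > x then some e else some x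

-- inner loop of A: appending the row's divisible elements = acc ++ filter
theorem pv_inner (k : Int) (row : List Int) (acc : List Int) :
    row.foldl (fun acc elem => if PySem.Int.mod elem k == 0 then acc ++ [elem] else acc) acc
      = acc ++ row.filter (fun e => PySem.Int.mod e k == 0) := by
  induction row generalizing acc with
  | nil => simp
  | cons x t ih =>
    simp only [List.foldl_cons, List.filter_cons]
    by_cases h : (PySem.Int.mod x k == 0) = true
    · rw [if_pos h, ih, if_pos h, List.append_assoc]; rfl
    · rw [if_neg h, ih, if_neg h]

-- outer loop of A: the accumulated list is the filtered flattened matrix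
theorem pv_outer (k : Int) (matrix : List (List Int)) (acc : List Int) :
    matrix.foldl
      (fun acc row => row.foldl
        (fun acc elem => if PySem.Int.mod elem k == 0 then acc ++ [elem] else acc) acc)
      acc
      = acc ++ (matrix.flatMap (fun r => r)).filter (fun e => PySem.Int.mod e k == 0) := by
  induction matrix generalizing acc with
  | nil => simp
  | cons r t ih =>
    simp only [List.foldl_cons, List.flatMap_cons, List.filter_append]
    rw [pv_inner, ih, List.append_assoc]

-- B's nested fold = a single fold over the flattened matrix
theorem pv_alt_flat (k : Int) (matrix : List (List Int)) (st : Int × Option Int) :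
    matrix.foldl (fun st row => row.foldl (pvStepB k) st) st
      = (matrix.flatMap (fun r => r)).foldl (pvStepB k) st := by
  induction matrix generalizing st with
  | nil => rfl
  | cons r t ih => simp only [List.foldl_cons, List.flatMap_cons, List.foldl_append, ih]

-- B's fold in terms of the filtered list: count = c + length, best folds pvBest over it
theorem pv_fold_filter (k : Int) (l : List Int) (c : Int) (b : Option Int) :
    l.foldl (pvStepB k) (c, b)
      = (c + ((l.filter (fun e => PySem.Int.mod e k == 0)).length : Int),
         (l.filter (fun e => PySem.Int.mod e k == 0)).foldl pvBest b) := by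
  induction l generalizing c b with
  | nil => simp
  | cons x t ih =>
    simp only [List.foldl_cons, List.filter_cons, pvStepB]
    by_cases h : (PySem.Int.mod x k == 0) = true
    · rw [if_pos h, ih]
      have h' : PySem.Int.mod x k = 0 := by simpa using h
      rw [if_pos h]
      refine Prod.ext ?_ ?_
      · push_cast [List.length_cons]; omega
      · rw [List.foldl_cons]; rfl
    · rw [if_neg h, ih, if_neg h]

-- folding pvBest from some x is the running max
theorem pv_best_max (t : List Int) (x : Int) :
    t.foldl pvBest (some x) = some (t.foldl max x) := by
  induction t generalizing x with
  | nil => rfl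
  | cons y s ih =>
    simp only [List.foldl_cons, pvBest]
    rw [show (if y > x then some y else some x) = some (max x y) by
      by_cases h : y > x
      · rw [if_pos h]; congr 1; omega
      · rw [if_neg h]; congr 1; omega, ih]

-- ===== VERDICT (by name: the statement is the Claim_ definition above) =====
theorem find_A_and_max_spec : Claim_equal_find_A_and_max := by
  intro matrix k _ _
  unfold Spec_find_A_and_max find_A_and_max find_A_and_max_alt
  rw [pv_outer, pv_alt_flat, pv_fold_filter]
  simp only [List.nil_append]
  rcases h : (matrix.flatMap (fun r => r)).filter (fun e => PySem.Int.mod e k == 0) with _ | ⟨x, t⟩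
  · simp [PySem.List.max?]  -- both empty cases: (0, none)
  · simp only [List.isEmpty, List.foldl_cons]
    rw [show pvBest none x = some x from rfl, pv_best_max, PySem.List.max?_id_cons]
    simp
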